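-- pv_equiv track=rewrite | github.com/GlebDorohov17092006/AlgorithmHomework | water.py | calculate_flood_time
-- ===== SOURCE A (Python) =====
-- from collections import deque
--
-- def calculate_flood_time(area_string):
--     area_grid = [list(line) for line in area_string.strip().split('\n')]
--     rows_num, cols_num = len(area_grid), len(area_grid[0])
--
--     water_cells_queue = deque()
--     flood_times = [[-1] * cols_num for _ in range(rows_num)]
--
--     for row_idx in range(rows_num):
--         for col_idx in range(cols_num):
--             if area_grid[row_idx][col_idx] == 'W':
--                 water_cells_queue.append((row_idx, col_idx))
--                 flood_times[row_idx][col_idx] = 0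
--
--     move_directions = [(-1, 0), (1, 0), (0, -1), (0, 1)]
--
--     maximum_time = 0
--     while water_cells_queue:
--         current_row, current_col = water_cells_queue.popleft()
--         current_time_value = flood_times[current_row][current_col]
--
--         for dr_val, dc_val in move_directions:
--             next_row = current_row + dr_val
--             next_col = current_col + dc_val
--
--             if 0 <= next_row < rows_num and 0 <= next_col < cols_num:
--                 if area_grid[next_row][next_col] == 'L' and flood_times[next_row][next_col] == -1:
--                     flood_times[next_row][next_col] = current_time_value + 1
--                     water_cells_queue.append((next_row, next_col))
--                     maximum_time = max(maximum_time, current_time_value + 1)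
--
--     return maximum_time
-- ===== SOURCE B (Python) =====
-- def calculate_flood_time(area_string):
--     # Cellular-automaton flooding: iterate the one-step flood operator
--     # (every 'L' cell with a 'W' neighbour becomes 'W') to a fixpoint,
--     # counting the rounds.
--     grid = [list(line) for line in area_string.strip().split('\n')]
--     time = 0
--     while True:
--         next_grid = [
--             ['W' if ch == 'L' and (
--                     (r > 0 and c < len(grid[r - 1]) and grid[r - 1][c] == 'W')
--                     or (r + 1 < len(grid) and c < len(grid[r + 1]) and grid[r + 1][c] == 'W')
--                     or (c > 0 and row[c - 1] == 'W')
--                     or (c + 1 < len(row) and row[c + 1] == 'W'))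
--              else ch
--              for c, ch in enumerate(row)]
--             for r, row in enumerate(grid)]
--         if next_grid == grid:
--             return time
--         grid = next_grid
--         time += 1
-- ===== Notes on version B (the rewrite author's own statement) =====
-- stated objective: alternative
-- what changed: Replaces the queue + distance-grid BFS with a running max by a cellular-automaton simulation: iterate the one-step flood operator (every 'L' cell with a 'W' neighbour turns to 'W') on the grid itself until a fixpoint, counting the rounds.
-- outside the precondition, e.g. on calculate_flood_time('W\nLL'): A returns 1, B returns 2
import Mathlib
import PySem

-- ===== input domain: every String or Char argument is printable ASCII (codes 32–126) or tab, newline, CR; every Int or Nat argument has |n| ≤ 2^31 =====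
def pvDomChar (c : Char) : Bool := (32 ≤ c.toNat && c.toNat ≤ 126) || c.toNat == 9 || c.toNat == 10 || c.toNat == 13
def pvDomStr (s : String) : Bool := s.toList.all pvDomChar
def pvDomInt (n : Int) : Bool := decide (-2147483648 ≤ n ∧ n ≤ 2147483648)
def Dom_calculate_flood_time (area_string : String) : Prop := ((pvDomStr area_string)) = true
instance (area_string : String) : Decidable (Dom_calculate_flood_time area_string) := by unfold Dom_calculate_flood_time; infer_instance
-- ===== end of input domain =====

-- B replaces A's deque+distance-grid BFS (with a running max) by a cellular-automaton
-- simulation: iterate the one-step flood operator on the grid itself until a fixpoint,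
-- counting rounds (objective: alternative).

-- shared 2-d grid primitives (Python's g[r][c] read / g[r][c] = v write, indices checked in range)
def pvGet2 {α : Type} (g : List (List α)) (r c : Int) : Option α :=
  (PySem.List.pyGet? g r).bind (fun row => PySem.List.pyGet? row c)

def pvSet2 {α : Type} (g : List (List α)) (r c : Int) (v : α) : List (List α) :=
  g.modify r.toNat (fun row => row.set c.toNat v)

-- ===== PORT A =====
def cftA_dirs : List (Int × Int) := [(-1, 0), (1, 0), (0, -1), (0, 1)]

-- body of A's 'for dr_val, dc_val in move_directions' loop
def cftA_relax (grid : List (List Char)) (rows cols r c t : Int)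
    (st : List (List Int) × List (Int × Int) × Int) (d : Int × Int) :
    List (List Int) × List (Int × Int) × Int :=
  let nr := r + d.1
  let nc := c + d.2
  if 0 ≤ nr ∧ nr < rows ∧ 0 ≤ nc ∧ nc < cols then
    if pvGet2 grid nr nc = some 'L' ∧ pvGet2 st.1 nr nc = some (-1) then
      (pvSet2 st.1 nr nc (t + 1), st.2.1 ++ [(nr, nc)], max st.2.2 (t + 1))
    else st
  else st

-- A's double scan collecting water cells and initialising flood_times
def cftA_init (grid : List (List Char)) (rows cols : Int) :
    List (Int × Int) × List (List Int) :=
  (PySem.List.pyRange 0 rows 1).foldl (fun st r =>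
      (PySem.List.pyRange 0 cols 1).foldl (fun st c =>
        if pvGet2 grid r c = some 'W' then (st.1 ++ [(r, c)], pvSet2 st.2 r c 0) else st) st)
    (([] : List (Int × Int)), List.replicate rows.toNat (List.replicate cols.toNat (-1 : Int)))

-- A's 'while water_cells_queue' loop; the Nat argument is fuel making the recursion total
def cftA_loop (grid : List (List Char)) (rows cols : Int) :
    Nat → List (Int × Int) → List (List Int) → Int → Int
  | 0, _, _, maxt => maxt
  | _ + 1, [], _, maxt => maxt
  | fuel + 1, (r, c) :: qs, flood, maxt =>
    let t := (pvGet2 flood r c).getD 0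
    let st := cftA_dirs.foldl (cftA_relax grid rows cols r c t) (flood, qs, maxt)
    cftA_loop grid rows cols fuel st.2.1 st.1 st.2.2

def calculate_flood_time (area_string : String) : Int :=
  let grid := PySem.Chars.splitOn (PySem.Chars.strip area_string.toList) ['\n']
  let rows : Int := grid.length
  let cols : Int := (grid.headD []).length
  let init := cftA_init grid rows cols
  cftA_loop grid rows cols (init.1.length + 2 * (rows.toNat * cols.toNat) + 1) init.1 init.2 0

-- ===== PORT B =====
-- one round of B's comprehension: every 'L' cell with a 'W' neighbour becomes 'W'
-- (the python bounds-guard 'r > 0 and c < len(grid[r-1]) and grid[r-1][c] == "W"' is the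
--  checked read 0 < r ∧ pvGet2 grid (r-1) c = some 'W', exactly, since c ≥ 0)
def cftB_round (grid : List (List Char)) : List (List Char) :=
  (PySem.List.enumerate grid).map (fun rp =>
    (PySem.List.enumerate rp.2).map (fun cp =>
      if cp.2 = 'L' ∧
          ((0 < rp.1 ∧ pvGet2 grid (rp.1 - 1) cp.1 = some 'W') ∨
           (rp.1 + 1 < (grid.length : Int) ∧ pvGet2 grid (rp.1 + 1) cp.1 = some 'W') ∨
           (0 < cp.1 ∧ PySem.List.pyGet? rp.2 (cp.1 - 1) = some 'W') ∨
           (cp.1 + 1 < (rp.2.length : Int) ∧ PySem.List.pyGet? rp.2 (cp.1 + 1) = some 'W'))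
      then 'W' else cp.2))

-- B's 'while True' loop; the Nat argument is fuel making the recursion total
def cftB_loop : List (List Char) → Nat → Int → Int
  | _, 0, time => time
  | g, fuel + 1, time =>
    let ng := cftB_round g
    if ng = g then time else cftB_loop ng fuel (time + 1)

def calculate_flood_time_alt (area_string : String) : Int :=
  let grid := PySem.Chars.splitOn (PySem.Chars.strip area_string.toList) ['\n']
  cftB_loop grid ((grid.map List.length).sum + 1) 0

-- ===== PRECONDITION & SPEC =====
-- Pre_ restricts to rectangular grids (the task's natural domain): a stripped line shorter
-- than the first makes A raise IndexError, and a longer line has trailing cells A silently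
-- ignores while B floods them too.
def Pre_calculate_flood_time (area_string : String) : Prop :=
  ∀ line ∈ PySem.Chars.splitOn (PySem.Chars.strip area_string.toList) ['\n'],
    line.length = ((PySem.Chars.splitOn (PySem.Chars.strip area_string.toList) ['\n']).headD []).length
instance (area_string : String) : Decidable (Pre_calculate_flood_time area_string) := by
  unfold Pre_calculate_flood_time; infer_instance

def pvWitness_calculate_flood_time : String := "WL\nLL"

def Spec_calculate_flood_time (area_string : String) (out : Int) : Prop :=
  out = calculate_flood_time_alt area_string
instance (area_string : String) (out : Int) : Decidable (Spec_calculate_flood_time area_string out) := by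
  unfold Spec_calculate_flood_time; infer_instance

-- ===== CLAIM (what is proved, stated in full; the proofs are below) =====
def Claim_equal_calculate_flood_time : Prop := ∀ (area_string : String), Dom_calculate_flood_time area_string → Pre_calculate_flood_time area_string → Spec_calculate_flood_time area_string (calculate_flood_time area_string)

-- ===== LEMMAS AND PROOFS =====

-- shapes and basic access lemmas
def pvShape {α : Type} (g : List (List α)) (R C : Nat) : Prop :=
  g.length = R ∧ ∀ row ∈ g, row.length = C

theorem pvGet2_natCast {α : Type} (g : List (List α)) (r c : Nat) :
    pvGet2 g (r : Int) (c : Int) = g[r]?.bind (fun row => row[c]?) := by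
  simp [pvGet2]

theorem pvInt_cases {i : Int} {n : Nat} (h0 : 0 ≤ i) (hn : i < (n : Int)) :
    ∃ k : Nat, i = (k : Int) ∧ k < n :=
  ⟨i.toNat, (Int.toNat_of_nonneg h0).symm, by omega⟩

theorem pvShape_set2 {α : Type} {g : List (List α)} {R C : Nat} (hs : pvShape g R C)
    {r : Nat} (hr : r < R) (c : Nat) (v : α) :
    pvShape (pvSet2 g (r : Int) (c : Int) v) R C := by
  obtain ⟨hlen, hrow⟩ := hs
  have hr' : r < g.length := by omega
  constructor
  · simp [pvSet2, hlen]
  · intro row hmem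
    rw [pvSet2, Int.toNat_natCast, Int.toNat_natCast, List.modify_eq_set] at hmem
    rcases List.mem_or_eq_of_mem_set hmem with h | h
    · exact hrow _ h
    · subst h
      rw [List.length_set, List.getElem?_eq_getElem hr']
      simpa using hrow _ (List.getElem_mem hr')

theorem pvGet2_set2_same {α : Type} {g : List (List α)} {R C : Nat} (hs : pvShape g R C)
    {r c : Nat} (hr : r < R) (hc : c < C) (v : α) :
    pvGet2 (pvSet2 g (r : Int) (c : Int) v) (r : Int) (c : Int) = some v := by
  obtain ⟨hlen, hrow⟩ := hs
  have hr' : r < g.length := by omega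
  have hcl : c < (g[r]'hr').length := by
    rw [hrow _ (List.getElem_mem hr')]; exact hc
  rw [pvGet2_natCast, pvSet2, Int.toNat_natCast, Int.toNat_natCast,
    List.getElem?_modify, List.getElem?_eq_getElem hr']
  simp [List.getElem?_set, hcl]

theorem pvGet2_set2_ne {α : Type} (g : List (List α)) {r c r' c' : Nat}
    (h : ¬ (r' = r ∧ c' = c)) (v : α) :
    pvGet2 (pvSet2 g (r : Int) (c : Int) v) (r' : Int) (c' : Int) =
      pvGet2 g (r' : Int) (c' : Int) := by
  rw [pvGet2_natCast, pvGet2_natCast, pvSet2, Int.toNat_natCast, Int.toNat_natCast,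
    List.getElem?_modify]
  by_cases hrr : r = r'
  · subst hrr
    have hcc : c ≠ c' := fun hc => h ⟨rfl, hc.symm⟩
    cases hg : g[r]? with
    | none => simp
    | some row => simp [List.getElem?_set, hcc]
  · cases hg : g[r']? with
    | none => simp
    | some row => simp [hrr]

-- the (-1)-count of a flood grid, the measure driving both loops
def pvNegCount (v : List (List Int)) : Nat := (v.map (fun row => row.count (-1))).sum

theorem pvCountSet : ∀ (row : List Int) (c : Nat) (v : Int), v ≠ -1 → row[c]? = some (-1) →
    (row.set c v).count (-1) + 1 = row.count (-1) := by
  intro row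
  induction row with
  | nil => intro c v _ h; simp at h
  | cons b bs ih =>
    intro c v hv h
    cases c with
    | zero =>
      simp at h
      subst h
      simp [List.count_cons, hv]
    | succ n =>
      simp at h
      have := ih n v hv h
      simp [List.count_cons]
      omega

theorem pvNegCount_modify : ∀ (g : List (List Int)) (r c : Nat) (v : Int), v ≠ -1 →
    (g[r]?.bind fun row => row[c]?) = some (-1) →
    pvNegCount (g.modify r (fun row => row.set c v)) + 1 = pvNegCount g := by
  intro g
  induction g with
  | nil => intro r c v _ h; simp at h
  | cons row rest ih =>
    intro r c v hv h
    cases r with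
    | zero =>
      simp at h
      have hc := pvCountSet row c v hv h
      simp [pvNegCount, List.modify]
      omega
    | succ n =>
      simp at h
      have := ih n c v hv h
      simp [pvNegCount, List.modify] at this ⊢
      omega

theorem pvNegCount_set2 {g : List (List Int)} {r c : Nat} {v : Int} (hv : v ≠ -1)
    (h : pvGet2 g (r : Int) (c : Int) = some (-1)) :
    pvNegCount (pvSet2 g (r : Int) (c : Int) v) + 1 = pvNegCount g := by
  rw [pvGet2_natCast] at h
  rw [pvSet2, Int.toNat_natCast, Int.toNat_natCast]
  exact pvNegCount_modify g r c v hv h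

theorem pvNegCount_le' : ∀ (g : List (List Int)) (C : Nat),
    (∀ row ∈ g, row.length = C) → pvNegCount g ≤ g.length * C := by
  intro g C
  induction g with
  | nil => intro _; simp [pvNegCount]
  | cons row rest ih =>
    intro hrow
    have h1 : row.count (-1) ≤ C := by
      rw [← hrow row List.mem_cons_self]
      exact List.count_le_length
    have h2 : pvNegCount rest ≤ rest.length * C :=
      ih (fun r hr => hrow r (List.mem_cons_of_mem _ hr))
    simp [pvNegCount] at h2 ⊢
    rw [Nat.succ_mul]
    omega

theorem pvNegCount_le {g : List (List Int)} {R C : Nat} (hs : pvShape g R C) :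
    pvNegCount g ≤ R * C := by
  obtain ⟨hlen, hrow⟩ := hs
  rw [← hlen]
  exact pvNegCount_le' g C hrow

-- coordinates known to lie on the grid
def pvOn (R C : Nat) (p : Int × Int) : Prop :=
  ∃ r c : Nat, p = ((r : Int), (c : Int)) ∧ r < R ∧ c < C

-- adjacency: q is one step from p in one of A's four directions
def pvAdjTo (p q : Int × Int) : Prop := ∃ d ∈ cftA_dirs, q = (p.1 + d.1, p.2 + d.2)

-- the wave condition: cell (r,c) gets flooded by the frontier cs
def pvWCond (G : List (List Char)) (flood : List (List Int)) (cs : List (Int × Int))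
    (r c : Nat) : Prop :=
  pvGet2 flood (r : Int) (c : Int) = some (-1) ∧ pvGet2 G (r : Int) (c : Int) = some 'L' ∧
    ∃ p ∈ cs, pvAdjTo p ((r : Int), (c : Int))

-- frontier cells lie on the grid and carry flood value t
def pvFront (R C : Nat) (flood : List (List Int)) (t : Int) (cs : List (Int × Int)) : Prop :=
  ∀ p ∈ cs, pvOn R C p ∧ pvGet2 flood p.1 p.2 = some t

-- every original 'W' cell is already flooded
def pvWIn (G : List (List Char)) (R C : Nat) (flood : List (List Int)) : Prop :=
  ∀ r c : Nat, r < R → c < C → pvGet2 G (r : Int) (c : Int) = some 'W' →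
    pvGet2 flood (r : Int) (c : Int) ≠ some (-1)

-- B's simulated grid shows 'W' exactly on flooded cells, the original character elsewhere
def pvSim (G : List (List Char)) (R C : Nat) (flood : List (List Int))
    (S : List (List Char)) : Prop :=
  ∀ r c : Nat, r < R → c < C →
    pvGet2 S (r : Int) (c : Int) =
      (if pvGet2 flood (r : Int) (c : Int) = some (-1)
       then pvGet2 G (r : Int) (c : Int) else some 'W')

-- an unflooded land cell has no flooded neighbour outside the current frontier
def pvNoSkip (G : List (List Char)) (R C : Nat) (flood : List (List Int))
    (cs : List (Int × Int)) : Prop :=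
  ∀ r c : Nat, r < R → c < C → pvGet2 G (r : Int) (c : Int) = some 'L' →
    pvGet2 flood (r : Int) (c : Int) = some (-1) →
    ∀ n m : Nat, n < R → m < C → pvAdjTo ((n : Int), (m : Int)) ((r : Int), (c : Int)) →
      pvGet2 flood (n : Int) (m : Int) ≠ some (-1) → ((n : Int), (m : Int)) ∈ cs
-- processing one frontier cell: A's fold over the four directions, characterised pointwise
theorem pv_dirsFold {G : List (List Char)} {R C : Nat}
    {r c : Nat} (hr : r < R) (hc : c < C) {t : Int} (ht : 0 ≤ t) :
    ∀ (ds : List (Int × Int)) (flood : List (List Int)) (Q : List (Int × Int)) (maxt : Int),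
      pvShape flood R C → maxt ≤ t + 1 →
      ∃ (flood' : List (List Int)) (new : List (Int × Int)),
        ds.foldl (cftA_relax G (R : Int) (C : Int) (r : Int) (c : Int) t) (flood, Q, maxt)
          = (flood', Q ++ new, if new = [] then maxt else t + 1)
        ∧ pvShape flood' R C
        ∧ (∀ r' c' : Nat, r' < R → c' < C →
            pvGet2 flood' (r' : Int) (c' : Int) =
              (if pvGet2 flood (r' : Int) (c' : Int) = some (-1) ∧
                  pvGet2 G (r' : Int) (c' : Int) = some 'L' ∧
                  (∃ d ∈ ds, ((r' : Int), (c' : Int)) = ((r : Int) + d.1, (c : Int) + d.2))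
               then some (t + 1) else pvGet2 flood (r' : Int) (c' : Int)))
        ∧ (∀ q, q ∈ new ↔ ∃ r' c' : Nat, q = ((r' : Int), (c' : Int)) ∧ r' < R ∧ c' < C ∧
             pvGet2 flood (r' : Int) (c' : Int) = some (-1) ∧
             pvGet2 G (r' : Int) (c' : Int) = some 'L' ∧
             (∃ d ∈ ds, ((r' : Int), (c' : Int)) = ((r : Int) + d.1, (c : Int) + d.2)))
        ∧ pvNegCount flood' + new.length = pvNegCount flood := by
  intro ds
  induction ds with
  | nil =>
    intro flood Q maxt hsf hm
    refine ⟨flood, [], by simp, hsf, ?_, ?_, by simp⟩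
    · intro r' c' _ _; simp
    · intro q; simp
  | cons d ds ih =>
    intro flood Q maxt hsf hm
    simp only [List.foldl_cons]
    by_cases hb : 0 ≤ (r : Int) + d.1 ∧ (r : Int) + d.1 < (R : Int) ∧
        0 ≤ (c : Int) + d.2 ∧ (c : Int) + d.2 < (C : Int)
    · obtain ⟨n, hn, hnR⟩ := pvInt_cases hb.1 hb.2.1
      obtain ⟨m, hm2, hmC⟩ := pvInt_cases hb.2.2.1 hb.2.2.2
      by_cases hLW : pvGet2 G ((r : Int) + d.1) ((c : Int) + d.2) = some 'L' ∧
          pvGet2 flood ((r : Int) + d.1) ((c : Int) + d.2) = some (-1)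
      · -- the cell gets flooded
        have hstep : cftA_relax G (R : Int) (C : Int) (r : Int) (c : Int) t
            (flood, Q, maxt) d =
            (pvSet2 flood ((r : Int) + d.1) ((c : Int) + d.2) (t + 1),
              Q ++ [((r : Int) + d.1, (c : Int) + d.2)], t + 1) := by
          rw [cftA_relax]
          simp only [if_pos hb, if_pos hLW]
          rw [max_eq_right hm]
        rw [hstep]
        have hsf1 : pvShape (pvSet2 flood ((r:Int)+d.1) ((c:Int)+d.2) (t+1)) R C := by
          rw [hn, hm2]; exact pvShape_set2 hsf hnR _ _
        obtain ⟨flood', new', e1, hsf', hpt', hmem', hnc'⟩ :=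
          ih (pvSet2 flood ((r:Int)+d.1) ((c:Int)+d.2) (t+1))
            (Q ++ [((r:Int)+d.1, (c:Int)+d.2)]) (t+1) hsf1 le_rfl
        have hset_same : pvGet2 (pvSet2 flood ((r:Int)+d.1) ((c:Int)+d.2) (t+1))
            ((r:Int)+d.1) ((c:Int)+d.2) = some (t+1) := by
          rw [hn, hm2]; exact pvGet2_set2_same hsf hnR hmC _
        refine ⟨flood', ((r:Int)+d.1, (c:Int)+d.2) :: new', ?_, hsf', ?_, ?_, ?_⟩
        · rw [e1]
          have h2 : (if new' = [] then t + 1 else t + 1) = t + 1 := by simp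
          rw [h2]
          simp
        · -- pointwise
          intro r' c' hr' hc'
          rw [hpt' r' c' hr' hc']
          by_cases hq : r' = n ∧ c' = m
          · obtain ⟨h1, h2⟩ := hq
            subst h1; subst h2
            rw [← hn, ← hm2, hset_same]
            have hfalse : ¬ (some (t+1) = some (-1 : Int)) := by
              intro hcon; simp at hcon; omega
            rw [if_neg (by intro hcon; exact hfalse hcon.1)]
            rw [if_pos ⟨hLW.2, hLW.1, ⟨d, List.mem_cons_self, rfl⟩⟩]
          · rw [hn, hm2, pvGet2_set2_ne flood hq]
            have hcond : (∃ d' ∈ ds, ((r' : Int), (c' : Int)) = ((r : Int) + d'.1, (c : Int) + d'.2))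
                ↔ (∃ d' ∈ d :: ds, ((r' : Int), (c' : Int)) = ((r : Int) + d'.1, (c : Int) + d'.2)) := by
              constructor
              · rintro ⟨d', hd', he⟩; exact ⟨d', List.mem_cons_of_mem _ hd', he⟩
              · rintro ⟨d', hd', he⟩
                rcases List.mem_cons.mp hd' with rfl | hd'
                · exfalso
                  apply hq
                  rw [hn, hm2] at he
                  rw [Prod.mk.injEq] at he
                  constructor <;> [exact_mod_cast he.1; exact_mod_cast he.2]
                · exact ⟨d', hd', he⟩
            simp only [hcond]
        · -- membership
          intro q
          rw [List.mem_cons, hmem' q]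
          constructor
          · rintro (rfl | ⟨r', c', rfl, hr', hc', hf1, hg1, d', hd', he⟩)
            · refine ⟨n, m, by rw [hn, hm2], hnR, hmC, ?_, ?_,
                ⟨d, List.mem_cons_self, by rw [hn, hm2]⟩⟩
              · rw [← hn, ← hm2]; exact hLW.2
              · rw [← hn, ← hm2]; exact hLW.1
            · rw [hn, hm2] at hf1
              have hq : ¬ (r' = n ∧ c' = m) := by
                intro hq'
                obtain ⟨h1, h2⟩ := hq'
                rw [h1, h2, pvGet2_set2_same hsf hnR hmC] at hf1
                simp at hf1; omega
              rw [pvGet2_set2_ne flood hq] at hf1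
              exact ⟨r', c', rfl, hr', hc', hf1, hg1, d', List.mem_cons_of_mem _ hd', he⟩
          · rintro ⟨r', c', rfl, hr', hc', hf, hg, d', hd', he⟩
            rcases List.mem_cons.mp hd' with rfl | hd'
            · left; rw [he]
            · by_cases hq : r' = n ∧ c' = m
              · left
                obtain ⟨h1, h2⟩ := hq
                rw [h1, h2, ← hn, ← hm2]
              · right
                refine ⟨r', c', rfl, hr', hc', ?_, hg, d', hd', he⟩
                rw [hn, hm2, pvGet2_set2_ne flood hq]
                exact hf
        · -- count
          have hdec : pvNegCount (pvSet2 flood ((r:Int)+d.1) ((c:Int)+d.2) (t+1)) + 1 =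
              pvNegCount flood := by
            rw [hn, hm2]
            exact pvNegCount_set2 (by omega) (by rw [← hn, ← hm2]; exact hLW.2)
          simp only [List.length_cons]
          omega
      · -- in bounds but no flood: state unchanged
        have hstep : cftA_relax G (R : Int) (C : Int) (r : Int) (c : Int) t
            (flood, Q, maxt) d = (flood, Q, maxt) := by
          rw [cftA_relax]
          simp only [if_pos hb, if_neg hLW]
        rw [hstep]
        obtain ⟨flood', new', e1, hsf', hpt', hmem', hnc'⟩ := ih flood Q maxt hsf hm
        have hcond : ∀ r' c' : Nat, r' < R → c' < C →
            ((pvGet2 flood (r' : Int) (c' : Int) = some (-1) ∧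
              pvGet2 G (r' : Int) (c' : Int) = some 'L' ∧
              (∃ d' ∈ d :: ds, ((r' : Int), (c' : Int)) = ((r : Int) + d'.1, (c : Int) + d'.2)))
            ↔ (pvGet2 flood (r' : Int) (c' : Int) = some (-1) ∧
              pvGet2 G (r' : Int) (c' : Int) = some 'L' ∧
              (∃ d' ∈ ds, ((r' : Int), (c' : Int)) = ((r : Int) + d'.1, (c : Int) + d'.2)))) := by
          intro r' c' hr' hc'
          constructor
          · rintro ⟨h1, h2, d', hd', he⟩
            rcases List.mem_cons.mp hd' with rfl | hd'
            · exfalso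
              rw [Prod.mk.injEq] at he
              rw [he.1, he.2] at h1 h2
              exact hLW ⟨h2, h1⟩
            · exact ⟨h1, h2, d', hd', he⟩
          · rintro ⟨h1, h2, d', hd', he⟩
            exact ⟨h1, h2, d', List.mem_cons_of_mem _ hd', he⟩
        refine ⟨flood', new', e1, hsf', ?_, ?_, hnc'⟩
        · intro r' c' hr' hc'
          rw [hpt' r' c' hr' hc']
          simp only [hcond r' c' hr' hc']
        · intro q
          rw [hmem' q]
          constructor
          · rintro ⟨r', c', rfl, hr', hc', h1, h2, h3⟩
            exact ⟨r', c', rfl, hr', hc', (hcond r' c' hr' hc').mpr ⟨h1, h2, h3⟩ |>.1,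
              ((hcond r' c' hr' hc').mpr ⟨h1, h2, h3⟩).2.1, ((hcond r' c' hr' hc').mpr ⟨h1, h2, h3⟩).2.2⟩
          · rintro ⟨r', c', rfl, hr', hc', h1, h2, h3⟩
            have := (hcond r' c' hr' hc').mp ⟨h1, h2, h3⟩
            exact ⟨r', c', rfl, hr', hc', this.1, this.2.1, this.2.2⟩
    · -- out of bounds: state unchanged, and the head direction reaches no grid cell
      have hstep : cftA_relax G (R : Int) (C : Int) (r : Int) (c : Int) t
          (flood, Q, maxt) d = (flood, Q, maxt) := by
        rw [cftA_relax]
        simp only [if_neg hb]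
      rw [hstep]
      obtain ⟨flood', new', e1, hsf', hpt', hmem', hnc'⟩ := ih flood Q maxt hsf hm
      have hnohead : ∀ r' c' : Nat, r' < R → c' < C →
          ¬ (((r' : Int), (c' : Int)) = ((r : Int) + d.1, (c : Int) + d.2)) := by
        intro r' c' hr' hc' he
        rw [Prod.mk.injEq] at he
        obtain ⟨he1, he2⟩ := he
        apply hb
        refine ⟨by omega, by omega, by omega, by omega⟩
      have hcond : ∀ r' c' : Nat, r' < R → c' < C →
          ((∃ d' ∈ d :: ds, ((r' : Int), (c' : Int)) = ((r : Int) + d'.1, (c : Int) + d'.2))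
          ↔ (∃ d' ∈ ds, ((r' : Int), (c' : Int)) = ((r : Int) + d'.1, (c : Int) + d'.2))) := by
        intro r' c' hr' hc'
        constructor
        · rintro ⟨d', hd', he⟩
          rcases List.mem_cons.mp hd' with rfl | hd'
          · exact absurd he (hnohead r' c' hr' hc')
          · exact ⟨d', hd', he⟩
        · rintro ⟨d', hd', he⟩
          exact ⟨d', List.mem_cons_of_mem _ hd', he⟩
      refine ⟨flood', new', e1, hsf', ?_, ?_, hnc'⟩
      · intro r' c' hr' hc'
        rw [hpt' r' c' hr' hc']
        simp only [hcond r' c' hr' hc']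
      · intro q
        rw [hmem' q]
        constructor
        · rintro ⟨r', c', rfl, hr', hc', h1, h2, h3⟩
          exact ⟨r', c', rfl, hr', hc', h1, h2, (hcond r' c' hr' hc').mpr h3⟩
        · rintro ⟨r', c', rfl, hr', hc', h1, h2, h3⟩
          exact ⟨r', c', rfl, hr', hc', h1, h2, (hcond r' c' hr' hc').mp h3⟩
theorem pvAdjTo_mk (a b : Int) (q : Int × Int) :
    pvAdjTo (a, b) q ↔ ∃ d ∈ cftA_dirs, q = (a + d.1, b + d.2) := Iff.rfl

-- one whole wave of A's loop: the frontier cs is consumed, flooding exactly the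
-- unflooded land cells adjacent to it
theorem pv_wave {G : List (List Char)} {R C : Nat} {t : Int} (ht : 0 ≤ t) :
    ∀ (cs : List (Int × Int)) (flood : List (List Int)) (Q : List (Int × Int))
      (maxt : Int) (fuel : Nat),
      pvShape flood R C → pvFront R C flood t cs → maxt ≤ t + 1 →
      ∃ (flood' : List (List Int)) (new : List (Int × Int)),
        cftA_loop G (R : Int) (C : Int) (fuel + cs.length) (cs ++ Q) flood maxt
          = cftA_loop G (R : Int) (C : Int) fuel (Q ++ new) flood'
              (if new = [] then maxt else t + 1)
        ∧ pvShape flood' R C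
        ∧ (∀ r' c' : Nat, r' < R → c' < C →
            (pvWCond G flood cs r' c' → pvGet2 flood' (r' : Int) (c' : Int) = some (t + 1)) ∧
            (¬ pvWCond G flood cs r' c' →
              pvGet2 flood' (r' : Int) (c' : Int) = pvGet2 flood (r' : Int) (c' : Int)))
        ∧ (∀ q, q ∈ new ↔ ∃ r' c' : Nat, q = ((r' : Int), (c' : Int)) ∧ r' < R ∧ c' < C ∧
             pvWCond G flood cs r' c')
        ∧ pvNegCount flood' + new.length = pvNegCount flood := by
  intro cs
  induction cs with
  | nil =>
    intro flood Q maxt fuel hsf hfront hm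
    refine ⟨flood, [], by simp, hsf, ?_, ?_, by simp⟩
    · intro r' c' _ _
      constructor
      · rintro ⟨_, _, p, hp, _⟩
        simp at hp
      · intro _; rfl
    · intro q
      simp only [List.not_mem_nil, false_iff]
      rintro ⟨r', c', _, _, _, _, _, p, hp, _⟩
      simp at hp
  | cons p cs ih =>
    intro flood Q maxt fuel hsf hfront hm
    obtain ⟨hOn, hft⟩ := hfront p List.mem_cons_self
    obtain ⟨a, b, rfl, haR, hbC⟩ := hOn
    have hlen : fuel + (((a : Int), (b : Int)) :: cs).length = (fuel + cs.length) + 1 := by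
      simp only [List.length_cons]
      omega
    rw [hlen]
    have hq : (((a : Int), (b : Int)) :: cs) ++ Q = ((a : Int), (b : Int)) :: (cs ++ Q) := by simp
    rw [hq]
    simp only [cftA_loop]
    simp only at hft
    rw [hft]
    simp only [Option.getD_some]
    obtain ⟨flood1, new1, e1, hsf1, hpt1, hmem1, hnc1⟩ :=
      pv_dirsFold haR hbC ht cftA_dirs flood (cs ++ Q) maxt hsf hm
    rw [e1]
    simp only []
    have hm1 : (if new1 = [] then maxt else t + 1) ≤ t + 1 := by split <;> omega
    have hfront1 : pvFront R C flood1 t cs := by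
      intro p' hp'
      obtain ⟨hOn', hft'⟩ := hfront p' (List.mem_cons_of_mem _ hp')
      obtain ⟨a', b', rfl, ha', hb'⟩ := hOn'
      refine ⟨⟨a', b', rfl, ha', hb'⟩, ?_⟩
      simp only at hft' ⊢
      rw [hpt1 a' b' ha' hb']
      rw [if_neg]
      · exact hft'
      · rintro ⟨hcon, _, _⟩
        rw [hft'] at hcon
        simp at hcon
        omega
    obtain ⟨flood', new', e2, hsf', hpt', hmem', hnc'⟩ :=
      ih flood1 (Q ++ new1) (if new1 = [] then maxt else t + 1) fuel hsf1 hfront1 hm1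
    have hassoc : cs ++ (Q ++ new1) = (cs ++ Q) ++ new1 := by simp
    rw [hassoc] at e2
    refine ⟨flood', new1 ++ new', ?_, hsf', ?_, ?_, ?_⟩
    · rw [e2]
      have hmx : (if new' = [] then (if new1 = [] then maxt else t + 1) else t + 1)
          = (if new1 ++ new' = [] then maxt else t + 1) := by
        by_cases h1 : new1 = [] <;> by_cases h2 : new' = [] <;> simp [h1, h2]
      rw [hmx, List.append_assoc]
    · -- pointwise
      intro r' c' hr' hc'
      by_cases hcp : pvGet2 flood (r' : Int) (c' : Int) = some (-1) ∧
          pvGet2 G (r' : Int) (c' : Int) = some 'L' ∧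
          (∃ d ∈ cftA_dirs, ((r' : Int), (c' : Int)) = ((a : Int) + d.1, (b : Int) + d.2))
      · -- flooded by the head cell
        have h1 : pvGet2 flood1 (r' : Int) (c' : Int) = some (t + 1) := by
          rw [hpt1 r' c' hr' hc', if_pos hcp]
        have hnc : ¬ pvWCond G flood1 cs r' c' := by
          rintro ⟨hcon, _, _⟩
          rw [h1] at hcon
          simp at hcon
          omega
        constructor
        · intro _
          rw [(hpt' r' c' hr' hc').2 hnc, h1]
        · intro hcon
          exact absurd ⟨hcp.1, hcp.2.1,
            ⟨((a : Int), (b : Int)), List.mem_cons_self, (pvAdjTo_mk _ _ _).mpr hcp.2.2⟩⟩ hcon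
      · -- untouched by the head cell
        have h1 : pvGet2 flood1 (r' : Int) (c' : Int) = pvGet2 flood (r' : Int) (c' : Int) := by
          rw [hpt1 r' c' hr' hc', if_neg hcp]
        constructor
        · rintro ⟨hf, hg, p', hp', hadj⟩
          rcases List.mem_cons.mp hp' with rfl | hp'
          · exact absurd ⟨hf, hg, (pvAdjTo_mk _ _ _).mp hadj⟩ hcp
          · exact (hpt' r' c' hr' hc').1 ⟨by rw [h1]; exact hf, hg, p', hp', hadj⟩
        · intro hcon
          have hnc1 : ¬ pvWCond G flood1 cs r' c' := by
            rintro ⟨hf, hg, p', hp', hadj⟩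
            exact hcon ⟨by rw [← h1]; exact hf, hg, p', List.mem_cons_of_mem _ hp', hadj⟩
          rw [(hpt' r' c' hr' hc').2 hnc1, h1]
    · -- membership
      intro q
      rw [List.mem_append, hmem1 q, hmem' q]
      constructor
      · rintro (⟨r', c', rfl, hr', hc', hf, hg, hd⟩ | ⟨r', c', rfl, hr', hc', hf1, hg, p', hp', hadj⟩)
        · exact ⟨r', c', rfl, hr', hc', hf, hg,
            ⟨((a : Int), (b : Int)), List.mem_cons_self, (pvAdjTo_mk _ _ _).mpr hd⟩⟩
        · rw [hpt1 r' c' hr' hc'] at hf1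
          by_cases hcp : pvGet2 flood (r' : Int) (c' : Int) = some (-1) ∧
              pvGet2 G (r' : Int) (c' : Int) = some 'L' ∧
              (∃ d ∈ cftA_dirs, ((r' : Int), (c' : Int)) = ((a : Int) + d.1, (b : Int) + d.2))
          · rw [if_pos hcp] at hf1
            simp at hf1
            omega
          · rw [if_neg hcp] at hf1
            exact ⟨r', c', rfl, hr', hc', hf1, hg, p', List.mem_cons_of_mem _ hp', hadj⟩
      · rintro ⟨r', c', rfl, hr', hc', hf, hg, p', hp', hadj⟩
        rcases List.mem_cons.mp hp' with rfl | hp'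
        · exact Or.inl ⟨r', c', rfl, hr', hc', hf, hg, (pvAdjTo_mk _ _ _).mp hadj⟩
        · by_cases hcp : pvGet2 flood (r' : Int) (c' : Int) = some (-1) ∧
              pvGet2 G (r' : Int) (c' : Int) = some 'L' ∧
              (∃ d ∈ cftA_dirs, ((r' : Int), (c' : Int)) = ((a : Int) + d.1, (b : Int) + d.2))
          · exact Or.inl ⟨r', c', rfl, hr', hc', hcp.1, hcp.2.1, hcp.2.2⟩
          · refine Or.inr ⟨r', c', rfl, hr', hc', ?_, hg, p', hp', hadj⟩
            rw [hpt1 r' c' hr' hc', if_neg hcp]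
            exact hf
    · rw [List.length_append]
      omega
theorem pvGet2_eq_getElem {α : Type} {S : List (List α)} {r c : Nat} (hr : r < S.length)
    (hc : c < (S[r]'hr).length) :
    pvGet2 S (r : Int) (c : Int) = some ((S[r]'hr)[c]'hc) := by
  rw [pvGet2_natCast, List.getElem?_eq_getElem hr]
  simp [List.getElem?_eq_getElem hc]

theorem pvGet2_row {α : Type} {S : List (List α)} {r : Nat} (hr : r < S.length) (y : Int) :
    pvGet2 S (r : Int) y = PySem.List.pyGet? (S[r]'hr) y := by
  rw [pvGet2, PySem.List.pyGet?_natCast, List.getElem?_eq_getElem hr]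
  rfl

-- pointwise value of one round of B's comprehension
theorem pvRound_get {S : List (List Char)} {r c : Nat} (hr : r < S.length)
    (hc : c < (S[r]'hr).length) :
    pvGet2 (cftB_round S) (r : Int) (c : Int) = some (
      if (S[r]'hr)[c]'hc = 'L' ∧
          ((0 < (r : Int) ∧ pvGet2 S ((r : Int) - 1) (c : Int) = some 'W') ∨
           ((r : Int) + 1 < (S.length : Int) ∧ pvGet2 S ((r : Int) + 1) (c : Int) = some 'W') ∨
           (0 < (c : Int) ∧ PySem.List.pyGet? (S[r]'hr) ((c : Int) - 1) = some 'W') ∨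
           ((c : Int) + 1 < ((S[r]'hr).length : Int) ∧
             PySem.List.pyGet? (S[r]'hr) ((c : Int) + 1) = some 'W'))
      then 'W' else (S[r]'hr)[c]'hc) := by
  rw [pvGet2_natCast, cftB_round]
  rw [List.getElem?_map, PySem.List.getElem?_enumerate, List.getElem?_eq_getElem hr]
  simp only [Option.map_some, Option.bind_some]
  rw [List.getElem?_map, PySem.List.getElem?_enumerate, List.getElem?_eq_getElem hc]
  simp only [Option.map_some, zero_add]

theorem pvRound_shape {S : List (List Char)} {R C : Nat} (hs : pvShape S R C) :
    pvShape (cftB_round S) R C := by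
  obtain ⟨hlen, hrow⟩ := hs
  constructor
  · rw [cftB_round, List.length_map, PySem.List.length_enumerate, hlen]
  · intro row hmem
    rw [cftB_round] at hmem
    obtain ⟨rp, hrp, rfl⟩ := List.mem_map.mp hmem
    obtain ⟨k, hk, rfl⟩ := (PySem.List.mem_enumerate_iff _ _ _).mp hrp
    rw [List.length_map, PySem.List.length_enumerate]
    exact hrow _ (List.getElem_mem hk)

-- two equally-shaped grids that agree pointwise are equal
theorem pvEq2 {α : Type} {S S' : List (List α)} {R C : Nat}
    (hs : pvShape S R C) (hs' : pvShape S' R C)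
    (h : ∀ r c : Nat, r < R → c < C → pvGet2 S (r : Int) (c : Int) = pvGet2 S' (r : Int) (c : Int)) :
    S = S' := by
  obtain ⟨hlen, hrow⟩ := hs
  obtain ⟨hlen', hrow'⟩ := hs'
  apply List.ext_getElem (by omega)
  intro r hr1 hr2
  have hrR : r < R := by omega
  apply List.ext_getElem
  · rw [hrow _ (List.getElem_mem hr1), hrow' _ (List.getElem_mem hr2)]
  · intro c hc1 hc2
    have hcC : c < C := by rw [hrow _ (List.getElem_mem hr1)] at hc1; exact hc1
    have e1 := pvGet2_eq_getElem hr1 hc1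
    have e2 := pvGet2_eq_getElem hr2 hc2
    have := h r c hrR hcC
    rw [e1, e2] at this
    exact Option.some_injective _ this
-- one round of B's comprehension floods exactly the cells of A's wave condition
theorem pv_roundSim {G S : List (List Char)} {flood : List (List Int)} {R C : Nat} {t : Int}
    {cs : List (Int × Int)} (ht : 0 ≤ t)
    (hsS : pvShape S R C)
    (hsim : pvSim G R C flood S) (hwin : pvWIn G R C flood)
    (hfront : pvFront R C flood t cs) (hnoskip : pvNoSkip G R C flood cs)
    {r c : Nat} (hr : r < R) (hc : c < C) :
    (pvWCond G flood cs r c →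
      pvGet2 (cftB_round S) (r : Int) (c : Int) = some 'W' ∧
      pvGet2 S (r : Int) (c : Int) = some 'L') ∧
    (¬ pvWCond G flood cs r c →
      pvGet2 (cftB_round S) (r : Int) (c : Int) = pvGet2 S (r : Int) (c : Int)) := by
  have hrS : r < S.length := by rw [hsS.1]; exact hr
  have hcS : c < (S[r]'hrS).length := by rw [hsS.2 _ (List.getElem_mem hrS)]; exact hc
  have hS : pvGet2 S (r : Int) (c : Int) = some ((S[r]'hrS)[c]'hcS) := pvGet2_eq_getElem hrS hcS
  have hround := pvRound_get hrS hcS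
  have hrowlen : ((S[r]'hrS).length : Int) = (C : Int) := by
    rw [hsS.2 _ (List.getElem_mem hrS)]
  have hSlen : (S.length : Int) = (R : Int) := by rw [hsS.1]
  have hnb : ∀ n m : Nat, n < R → m < C →
      (pvGet2 S (n : Int) (m : Int) = some 'W' ↔
        pvGet2 flood (n : Int) (m : Int) ≠ some (-1)) := by
    intro n m hn hm
    rw [hsim n m hn hm]
    by_cases hf : pvGet2 flood (n : Int) (m : Int) = some (-1)
    · rw [if_pos hf]
      constructor
      · intro hW; exact absurd hf (hwin n m hn hm hW)
      · intro h; exact absurd hf h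
    · rw [if_neg hf]; simp [hf]
  have hbc : ((S[r]'hrS)[c]'hcS = 'L' ∧
      ((0 < (r : Int) ∧ pvGet2 S ((r : Int) - 1) (c : Int) = some 'W') ∨
       ((r : Int) + 1 < (S.length : Int) ∧ pvGet2 S ((r : Int) + 1) (c : Int) = some 'W') ∨
       (0 < (c : Int) ∧ PySem.List.pyGet? (S[r]'hrS) ((c : Int) - 1) = some 'W') ∨
       ((c : Int) + 1 < ((S[r]'hrS).length : Int) ∧
         PySem.List.pyGet? (S[r]'hrS) ((c : Int) + 1) = some 'W')))
      ↔ pvWCond G flood cs r c := by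
    constructor
    · rintro ⟨hchL, hdisj⟩
      have hSL : pvGet2 S (r : Int) (c : Int) = some 'L' := by rw [hS, hchL]
      have hfl : pvGet2 flood (r : Int) (c : Int) = some (-1) := by
        by_contra hf
        rw [hsim r c hr hc, if_neg hf] at hSL
        simp at hSL
      have hGL : pvGet2 G (r : Int) (c : Int) = some 'L' := by
        rw [hsim r c hr hc, if_pos hfl] at hSL
        exact hSL
      refine ⟨hfl, hGL, ?_⟩
      rcases hdisj with ⟨hpos, hW⟩ | ⟨hlt, hW⟩ | ⟨hpos, hW⟩ | ⟨hlt, hW⟩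
      · -- upper neighbour (r-1, c)
        have hcast : (r : Int) - 1 = ((r - 1 : Nat) : Int) := by omega
        rw [hcast] at hW
        have hnR : r - 1 < R := by omega
        have hadj : pvAdjTo (((r - 1 : Nat) : Int), (c : Int)) ((r : Int), (c : Int)) :=
          ⟨(1, 0), by simp [cftA_dirs], by rw [Prod.mk.injEq]; constructor <;> [omega; simp]⟩
        exact ⟨_, hnoskip r c hr hc hGL hfl (r - 1) c hnR hc hadj
          ((hnb (r - 1) c hnR hc).mp hW), hadj⟩
      · -- lower neighbour (r+1, c)
        have hcast : (r : Int) + 1 = ((r + 1 : Nat) : Int) := by omega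
        rw [hcast] at hW
        have hnR : r + 1 < R := by rw [hSlen] at hlt; omega
        have hadj : pvAdjTo (((r + 1 : Nat) : Int), (c : Int)) ((r : Int), (c : Int)) :=
          ⟨(-1, 0), by simp [cftA_dirs], by rw [Prod.mk.injEq]; constructor <;> [omega; simp]⟩
        exact ⟨_, hnoskip r c hr hc hGL hfl (r + 1) c hnR hc hadj
          ((hnb (r + 1) c hnR hc).mp hW), hadj⟩
      · -- left neighbour (r, c-1)
        rw [← pvGet2_row hrS] at hW
        have hcast : (c : Int) - 1 = ((c - 1 : Nat) : Int) := by omega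
        rw [hcast] at hW
        have hmC : c - 1 < C := by omega
        have hadj : pvAdjTo ((r : Int), ((c - 1 : Nat) : Int)) ((r : Int), (c : Int)) :=
          ⟨(0, 1), by simp [cftA_dirs], by rw [Prod.mk.injEq]; constructor <;> [simp; omega]⟩
        exact ⟨_, hnoskip r c hr hc hGL hfl r (c - 1) hr hmC hadj
          ((hnb r (c - 1) hr hmC).mp hW), hadj⟩
      · -- right neighbour (r, c+1)
        rw [← pvGet2_row hrS] at hW
        have hcast : (c : Int) + 1 = ((c + 1 : Nat) : Int) := by omega
        rw [hcast] at hW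
        have hmC : c + 1 < C := by rw [hrowlen] at hlt; omega
        have hadj : pvAdjTo ((r : Int), ((c + 1 : Nat) : Int)) ((r : Int), (c : Int)) :=
          ⟨(0, -1), by simp [cftA_dirs], by rw [Prod.mk.injEq]; constructor <;> [simp; omega]⟩
        exact ⟨_, hnoskip r c hr hc hGL hfl r (c + 1) hr hmC hadj
          ((hnb r (c + 1) hr hmC).mp hW), hadj⟩
    · rintro ⟨hfl, hGL, p, hp, hadj⟩
      have hchL : (S[r]'hrS)[c]'hcS = 'L' := by
        have := hS
        rw [hsim r c hr hc, if_pos hfl, hGL] at this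
        exact (Option.some_injective _ this).symm
      refine ⟨hchL, ?_⟩
      obtain ⟨⟨a, b, rfl, haR, hbC⟩, hfv⟩ := hfront p hp
      simp only at hfv
      have hW : pvGet2 S (a : Int) (b : Int) = some 'W' := by
        apply (hnb a b haR hbC).mpr
        rw [hfv]
        intro hcon
        simp at hcon
        omega
      obtain ⟨d, hd, he⟩ := hadj
      simp only [cftA_dirs, List.mem_cons, List.not_mem_nil, or_false] at hd
      rw [Prod.mk.injEq] at he
      obtain ⟨he1, he2⟩ := he
      rcases hd with rfl | rfl | rfl | rfl
      · -- p is below: (a, b) = (r+1, c)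
        right; left
        simp only at he1 he2
        have ha : (a : Int) = (r : Int) + 1 := by omega
        have hb : (b : Int) = (c : Int) := by omega
        refine ⟨by rw [hSlen]; omega, ?_⟩
        rw [← ha, ← hb]
        exact hW
      · -- p is above: (a, b) = (r-1, c)
        left
        simp only at he1 he2
        have ha : (a : Int) = (r : Int) - 1 := by omega
        have hb : (b : Int) = (c : Int) := by omega
        refine ⟨by omega, ?_⟩
        rw [← ha, ← hb]
        exact hW
      · -- p is to the right: (a, b) = (r, c+1)
        right; right; right
        simp only at he1 he2
        have ha : (a : Int) = (r : Int) := by omega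
        have hb : (b : Int) = (c : Int) + 1 := by omega
        refine ⟨by rw [hrowlen]; omega, ?_⟩
        rw [← pvGet2_row hrS, ← ha, ← hb]
        exact hW
      · -- p is to the left: (a, b) = (r, c-1)
        right; right; left
        simp only at he1 he2
        have ha : (a : Int) = (r : Int) := by omega
        have hb : (b : Int) = (c : Int) - 1 := by omega
        refine ⟨by omega, ?_⟩
        rw [← pvGet2_row hrS, ← ha, ← hb]
        exact hW
  constructor
  · intro hw
    refine ⟨?_, ?_⟩
    · rw [hround, if_pos (hbc.mpr hw)]
    · rw [hsim r c hr hc, if_pos hw.1, hw.2.1]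
  · intro hnw
    rw [hround, if_neg (fun h => hnw (hbc.mp h)), hS]
-- the two loops agree from any wave boundary on
theorem pv_main {G : List (List Char)} {R C : Nat} :
    ∀ (fuelB fuelA : Nat) (cs : List (Int × Int)) (flood : List (List Int))
      (S : List (List Char)) (t : Int),
      0 ≤ t → pvShape flood R C → pvShape S R C →
      pvSim G R C flood S → pvWIn G R C flood → pvFront R C flood t cs →
      pvNoSkip G R C flood cs →
      cs.length + 2 * pvNegCount flood + 1 ≤ fuelA →
      pvNegCount flood + 1 ≤ fuelB →
      cftA_loop G (R : Int) (C : Int) fuelA cs flood t = cftB_loop S fuelB t := by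
  intro fuelB
  induction fuelB with
  | zero => intro fuelA cs flood S t _ _ _ _ _ _ _ _ hfb; omega
  | succ fb ih =>
    intro fuelA cs flood S t ht hsf hsS hsim hwin hfront hnoskip hfa hfb
    obtain ⟨fa, rfl⟩ : ∃ fa, fuelA = fa + cs.length := ⟨fuelA - cs.length, by omega⟩
    obtain ⟨flood', new, e1, hsf', hpt', hmem', hnc'⟩ :=
      pv_wave ht cs flood [] t fa hsf hfront (by omega)
    rw [List.append_nil] at e1
    rw [List.nil_append] at e1
    rw [e1]
    have hrs := fun (r c : Nat) (hr : r < R) (hc : c < C) =>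
      pv_roundSim ht hsS hsim hwin hfront hnoskip hr hc
    by_cases hnew : new = []
    · -- nothing flooded: A's queue runs dry, B reaches the fixpoint; both return t
      have hnc : ∀ r c : Nat, r < R → c < C → ¬ pvWCond G flood cs r c := by
        intro r c hr hc hw
        have hin := (hmem' ((r : Int), (c : Int))).mpr ⟨r, c, rfl, hr, hc, hw⟩
        rw [hnew] at hin
        simp at hin
      have hfix : cftB_round S = S :=
        pvEq2 (pvRound_shape hsS) hsS
          (fun r c hr hc => (hrs r c hr hc).2 (hnc r c hr hc))
      rw [hnew]
      obtain ⟨fa', rfl⟩ : ∃ fa', fa = fa' + 1 := ⟨fa - 1, by omega⟩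
      simp only [cftB_loop, cftA_loop, hfix]
      simp
    · -- at least one cell flooded: both sides advance one wave / one round
      have hdiff : cftB_round S ≠ S := by
        intro hfix
        obtain ⟨q, hq⟩ : ∃ q, q ∈ new := by
          cases new with
          | nil => exact absurd rfl hnew
          | cons a l => exact ⟨a, List.mem_cons_self⟩
        obtain ⟨r, c, rfl, hr, hc, hw⟩ := (hmem' q).mp hq
        obtain ⟨hW, hL⟩ := (hrs r c hr hc).1 hw
        rw [hfix, hL] at hW
        simp at hW
      have hBstep : cftB_loop S (fb + 1) t = cftB_loop (cftB_round S) fb (t + 1) := by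
        simp only [cftB_loop, if_neg hdiff]
      rw [hBstep, if_neg hnew]
      have hsim' : pvSim G R C flood' (cftB_round S) := by
        intro r c hr hc
        by_cases hw : pvWCond G flood cs r c
        · rw [(hpt' r c hr hc).1 hw, ((hrs r c hr hc).1 hw).1]
          rw [if_neg (by intro hcon; simp at hcon; omega)]
        · rw [(hpt' r c hr hc).2 hw, (hrs r c hr hc).2 hw]
          exact hsim r c hr hc
      have hwin' : pvWIn G R C flood' := by
        intro r c hr hc hGW hcon
        by_cases hw : pvWCond G flood cs r c
        · rw [(hpt' r c hr hc).1 hw] at hcon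
          simp at hcon
          omega
        · rw [(hpt' r c hr hc).2 hw] at hcon
          exact hwin r c hr hc hGW hcon
      have hfront' : pvFront R C flood' (t + 1) new := by
        intro p hp
        obtain ⟨r, c, rfl, hr, hc, hw⟩ := (hmem' p).mp hp
        exact ⟨⟨r, c, rfl, hr, hc⟩, (hpt' r c hr hc).1 hw⟩
      have hnoskip' : pvNoSkip G R C flood' new := by
        intro r c hr hc hGL hfl' n m hn hm hadj hfn'
        have hnw : ¬ pvWCond G flood cs r c := by
          intro hw
          rw [(hpt' r c hr hc).1 hw] at hfl'
          simp at hfl'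
          omega
        have hfl : pvGet2 flood (r : Int) (c : Int) = some (-1) := by
          rw [← (hpt' r c hr hc).2 hnw]
          exact hfl'
        by_cases hwn : pvWCond G flood cs n m
        · exact (hmem' _).mpr ⟨n, m, rfl, hn, hm, hwn⟩
        · exfalso
          have hfn : pvGet2 flood (n : Int) (m : Int) ≠ some (-1) := by
            rw [← (hpt' n m hn hm).2 hwn]
            exact hfn'
          have hmemcs := hnoskip r c hr hc hGL hfl n m hn hm hadj hfn
          exact hnw ⟨hfl, hGL, _, hmemcs, hadj⟩
      have hlen1 : 1 ≤ new.length := by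
        cases new with
        | nil => exact absurd rfl hnew
        | cons a l => simp
      exact ih fa new flood' (cftB_round S) (t + 1) (by omega) hsf' (pvRound_shape hsS)
        hsim' hwin' hfront' hnoskip' (by omega) (by omega)
-- a fold over nested ranges is a fold over the row-major coordinate list
def pvCells (R C : Nat) : List (Nat × Nat) :=
  (List.range R).flatMap (fun r => (List.range C).map (fun c => (r, c)))

theorem pv_nestfold {σ : Type} (R C : Nat) (F : σ → Int → Int → σ) (init : σ) :
    (PySem.List.pyRange 0 (R : Int) 1).foldl (fun st r =>
        (PySem.List.pyRange 0 (C : Int) 1).foldl (fun st c => F st r c) st) init =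
      (pvCells R C).foldl (fun st p => F st (p.1 : Int) (p.2 : Int)) init := by
  rw [pvCells, List.foldl_flatMap]
  rw [PySem.List.pyRange_zero_natCast, PySem.List.pyRange_zero_natCast]
  simp only [List.foldl_map]

theorem pv_cells_mem (R C : Nat) (p : Nat × Nat) :
    p ∈ pvCells R C ↔ p.1 < R ∧ p.2 < C := by
  simp only [pvCells, List.mem_flatMap, List.mem_map, List.mem_range]
  constructor
  · rintro ⟨r, hr, c, hc, rfl⟩
    exact ⟨hr, hc⟩
  · rintro ⟨h1, h2⟩
    exact ⟨p.1, h1, p.2, ⟨h2, rfl⟩⟩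

-- A's initial scan over a list of in-range cells, characterised
theorem pv_initCells {G : List (List Char)} {R C : Nat} :
    ∀ (ps : List (Nat × Nat)), (∀ p ∈ ps, p.1 < R ∧ p.2 < C) →
    ∀ (q : List (Int × Int)) (flood : List (List Int)), pvShape flood R C →
      ∃ flood',
        ps.foldl (fun st p => if pvGet2 G (p.1 : Int) (p.2 : Int) = some 'W'
            then (st.1 ++ [((p.1 : Int), (p.2 : Int))], pvSet2 st.2 (p.1 : Int) (p.2 : Int) 0)
            else st) (q, flood)
          = (q ++ (ps.filter (fun p => decide (pvGet2 G (p.1 : Int) (p.2 : Int) = some 'W'))).map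
              (fun p => ((p.1 : Int), (p.2 : Int))), flood')
        ∧ pvShape flood' R C
        ∧ ∀ r c : Nat, r < R → c < C →
            pvGet2 flood' (r : Int) (c : Int) =
              (if (r, c) ∈ ps ∧ pvGet2 G (r : Int) (c : Int) = some 'W'
               then some 0 else pvGet2 flood (r : Int) (c : Int)) := by
  intro ps
  induction ps with
  | nil =>
    intro _ q flood hsf
    refine ⟨flood, by simp, hsf, ?_⟩
    intro r c _ _
    simp
  | cons a ps ih =>
    intro hin q flood hsf
    have hinA := hin a List.mem_cons_self
    have hin' : ∀ p ∈ ps, p.1 < R ∧ p.2 < C := fun p hp => hin p (List.mem_cons_of_mem _ hp)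
    simp only [List.foldl_cons]
    by_cases hw : pvGet2 G (a.1 : Int) (a.2 : Int) = some 'W'
    · rw [if_pos hw]
      obtain ⟨flood', heq, hsf', hpt⟩ := ih hin' (q ++ [((a.1 : Int), (a.2 : Int))])
        (pvSet2 flood (a.1 : Int) (a.2 : Int) 0) (pvShape_set2 hsf hinA.1 _ _)
      refine ⟨flood', ?_, hsf', ?_⟩
      · rw [heq]
        rw [List.filter_cons_of_pos (by simp [hw])]
        simp
      · intro r c hr hc
        rw [hpt r c hr hc]
        by_cases h1 : pvGet2 G (r : Int) (c : Int) = some 'W'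
        · by_cases h2 : (r, c) ∈ ps
          · rw [if_pos ⟨h2, h1⟩, if_pos ⟨List.mem_cons_of_mem _ h2, h1⟩]
          · by_cases h3 : (r, c) = a
            · rw [if_neg (fun hcon => h2 hcon.1)]
              rw [if_pos ⟨by rw [h3]; exact List.mem_cons_self, h1⟩]
              have : r = a.1 ∧ c = a.2 := by
                rw [Prod.ext_iff] at h3
                exact ⟨h3.1, h3.2⟩
              rw [this.1, this.2]
              exact pvGet2_set2_same hsf hinA.1 hinA.2 0
            · rw [if_neg (fun hcon => h2 hcon.1)]
              rw [if_neg (fun hcon => by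
                rcases List.mem_cons.mp hcon.1 with h | h
                · exact h3 h
                · exact h2 h)]
              exact pvGet2_set2_ne flood
                (fun hcon => h3 (by rw [Prod.ext_iff]; exact ⟨hcon.1, hcon.2⟩)) 0
        · rw [if_neg (fun hcon => h1 hcon.2), if_neg (fun hcon => h1 hcon.2)]
          have h3 : ¬ (r = a.1 ∧ c = a.2) := by
            rintro ⟨rfl, rfl⟩
            exact h1 hw
          exact pvGet2_set2_ne flood h3 0
    · rw [if_neg hw]
      obtain ⟨flood', heq, hsf', hpt⟩ := ih hin' q flood hsf
      refine ⟨flood', ?_, hsf', ?_⟩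
      · rw [heq, List.filter_cons_of_neg (by simp [hw])]
      · intro r c hr hc
        rw [hpt r c hr hc]
        have hcond : ((r, c) ∈ ps ∧ pvGet2 G (r : Int) (c : Int) = some 'W')
            ↔ ((r, c) ∈ a :: ps ∧ pvGet2 G (r : Int) (c : Int) = some 'W') := by
          constructor
          · rintro ⟨h2, h1⟩
            exact ⟨List.mem_cons_of_mem _ h2, h1⟩
          · rintro ⟨h2, h1⟩
            rcases List.mem_cons.mp h2 with h | h
            · exfalso
              apply hw
              rw [← h]
              exact h1
            · exact ⟨h, h1⟩
        rw [if_congr hcond rfl rfl]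

theorem pv_rowsum {G : List (List Char)} {C : Nat}
    (hrect : ∀ row ∈ G, row.length = C) :
    (G.map List.length).sum = G.length * C := by
  induction G with
  | nil => simp
  | cons row rest ih =>
    have h1 : row.length = C := hrect _ List.mem_cons_self
    have h2 := ih (fun r hr => hrect r (List.mem_cons_of_mem _ hr))
    simp [h1, h2, Nat.succ_mul]
    omega

-- A's initialisation establishes all the wave-boundary invariants with S = G, t = 0
theorem pv_init {G : List (List Char)} {R C : Nat}
    (hR : G.length = R) (hrect : ∀ row ∈ G, row.length = C)
    (hC : (G.headD []).length = C) :
    ∃ (q0 : List (Int × Int)) (flood0 : List (List Int)),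
      cftA_init G (G.length : Int) ((G.headD []).length : Int) = (q0, flood0)
      ∧ pvShape flood0 R C
      ∧ pvSim G R C flood0 G ∧ pvWIn G R C flood0
      ∧ pvFront R C flood0 0 q0 ∧ pvNoSkip G R C flood0 q0 := by
  have hsg : pvShape G R C := ⟨hR, hrect⟩
  have hbase : pvShape (List.replicate R (List.replicate C (-1 : Int))) R C := by
    constructor
    · simp
    · intro row hrow
      rw [List.eq_of_mem_replicate hrow]
      simp
  obtain ⟨flood0, heq, hsf0, hpt0⟩ := pv_initCells (G := G) (pvCells R C)
    (fun p hp => (pv_cells_mem R C p).mp hp) [] _ hbase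
  rw [List.nil_append] at heq
  have hbasept : ∀ r c : Nat, r < R → c < C →
      pvGet2 (List.replicate R (List.replicate C (-1 : Int))) (r : Int) (c : Int) =
        some (-1) := by
    intro r c hr hc
    rw [pvGet2_natCast, List.getElem?_replicate, if_pos hr]
    simp [List.getElem?_replicate, hc]
  have hpt : ∀ r c : Nat, r < R → c < C →
      pvGet2 flood0 (r : Int) (c : Int) =
        (if pvGet2 G (r : Int) (c : Int) = some 'W' then some 0 else some (-1)) := by
    intro r c hr hc
    rw [hpt0 r c hr hc, hbasept r c hr hc]
    by_cases hw : pvGet2 G (r : Int) (c : Int) = some 'W'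
    · rw [if_pos ⟨(pv_cells_mem R C (r, c)).mpr ⟨hr, hc⟩, hw⟩, if_pos hw]
    · rw [if_neg (fun hcon => hw hcon.2), if_neg hw]
  have hmem : ∀ q : Int × Int,
      q ∈ ((pvCells R C).filter
          (fun p => decide (pvGet2 G (p.1 : Int) (p.2 : Int) = some 'W'))).map
          (fun p => ((p.1 : Int), (p.2 : Int))) ↔
        ∃ r c : Nat, q = ((r : Int), (c : Int)) ∧ r < R ∧ c < C ∧
          pvGet2 G (r : Int) (c : Int) = some 'W' := by
    intro q
    simp only [List.mem_map, List.mem_filter]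
    constructor
    · rintro ⟨p, ⟨hp, hw⟩, rfl⟩
      obtain ⟨h1, h2⟩ := (pv_cells_mem R C p).mp hp
      exact ⟨p.1, p.2, rfl, h1, h2, by simpa using hw⟩
    · rintro ⟨r, c, rfl, hr, hc, hw⟩
      exact ⟨(r, c), ⟨(pv_cells_mem R C (r, c)).mpr ⟨hr, hc⟩, by simpa using hw⟩, rfl⟩
  refine ⟨((pvCells R C).filter
      (fun p => decide (pvGet2 G (p.1 : Int) (p.2 : Int) = some 'W'))).map
      (fun p => ((p.1 : Int), (p.2 : Int))), flood0, ?_, hsf0, ?_, ?_, ?_, ?_⟩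
  · -- cftA_init is the canonical fold over the coordinate list
    rw [cftA_init, hR, hC]
    rw [Int.toNat_natCast, Int.toNat_natCast]
    rw [pv_nestfold R C (fun st r c => if pvGet2 G r c = some 'W'
      then (st.1 ++ [(r, c)], pvSet2 st.2 r c 0) else st)]
    exact heq
  · -- pvSim with S = G
    intro r c hr hc
    by_cases hw : pvGet2 G (r : Int) (c : Int) = some 'W'
    · rw [if_neg (by rw [hpt r c hr hc, if_pos hw]; simp), hw]
    · rw [if_pos (by rw [hpt r c hr hc, if_neg hw])]
  · -- pvWIn
    intro r c hr hc hw
    rw [hpt r c hr hc, if_pos hw]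
    simp
  · -- pvFront at t = 0
    intro p hp
    obtain ⟨r, c, rfl, hr, hc, hw⟩ := (hmem p).mp hp
    exact ⟨⟨r, c, rfl, hr, hc⟩, by rw [hpt r c hr hc, if_pos hw]⟩
  · -- pvNoSkip
    intro r c hr hc _ _ n m hn hm _ hfn
    apply (hmem _).mpr
    refine ⟨n, m, rfl, hn, hm, ?_⟩
    by_contra hw
    rw [hpt n m hn hm, if_neg hw] at hfn
    exact hfn rfl

-- ===== VERDICT (by name: the statement is the Claim_ definition above) =====
theorem calculate_flood_time_spec : Claim_equal_calculate_flood_time := by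
  intro s _ hpre
  unfold Spec_calculate_flood_time
  unfold Pre_calculate_flood_time at hpre
  rw [calculate_flood_time, calculate_flood_time_alt]
  obtain ⟨q0, flood0, eInit, hsf0, hsim0, hwin0, hfront0, hnoskip0⟩ :=
    pv_init (G := PySem.Chars.splitOn (PySem.Chars.strip s.toList) ['\n']) rfl hpre rfl
  rw [eInit]
  simp only [Int.toNat_natCast]
  have hNC := pvNegCount_le hsf0
  have hsum := pv_rowsum hpre
  rw [hsum]
  exact pv_main ((PySem.Chars.splitOn (PySem.Chars.strip s.toList) ['\n']).length *
        ((PySem.Chars.splitOn (PySem.Chars.strip s.toList) ['\n']).headD []).length + 1)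
    (q0.length + 2 * ((PySem.Chars.splitOn (PySem.Chars.strip s.toList) ['\n']).length *
        ((PySem.Chars.splitOn (PySem.Chars.strip s.toList) ['\n']).headD []).length) + 1)
    q0 flood0 (PySem.Chars.splitOn (PySem.Chars.strip s.toList) ['\n']) 0 le_rfl
    hsf0 ⟨rfl, hpre⟩ hsim0 hwin0 hfront0 hnoskip0 (by omega) (by omega)
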